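-- pv_equiv track=rewrite | github.com/hseulpark/bpmn-text-model-alignment | compare_spacy.py | inversion_count_and_involvement
-- ===== SOURCE A (Python) =====
-- from typing import List, Dict, Tuple, Any
-- from typing import List, Dict, Any, Tuple
--
-- def inversion_count_and_involvement(perm: List[int]) -> Tuple[int, List[int]]:
--     """
--     perm: model 순서로 정렬된 공통 태스크들을 user 순서 index로 바꾼 배열
--     - inversion count = Kendall tau distance
--     - involvement[k] = k번째 원소가 inversion에 얼마나 관여했는지(대략적인 blame)
--       (정확한 per-item involvement는 O(n^2)이 가장 간단; n이 작을 거라 가정하고 O(n^2)로 제공)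
--     """
--     n = len(perm)
--     if n <= 1:
--         return 0, [0] * n
--
--     # Kendall tau distance = inversion count (Fenwick BIT)
--     # 좌표압축
--     vals = sorted(set(perm))
--     rank = {v: idx + 1 for idx, v in enumerate(vals)}
--     bit = [0] * (len(vals) + 2)
--
--     def bit_add(i: int, v: int):
--         while i < len(bit):
--             bit[i] += v
--             i += i & -i
--
--     def bit_sum(i: int) -> int:
--         s = 0
--         while i > 0:
--             s += bit[i]
--             i -= i & -i
--         return s
--
--     inv = 0
--     seen = 0
--     for x in perm:
--         rx = rank[x]
--         inv += seen - bit_sum(rx)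
--         bit_add(rx, 1)
--         seen += 1
--
--     involvement = [0] * n
--     if n <= 2000:
--         for a in range(n):
--             for b in range(a + 1, n):
--                 if perm[a] > perm[b]:
--                     involvement[a] += 1
--                     involvement[b] += 1
--
--     return inv, involvement
-- ===== SOURCE B (Python) =====
-- from typing import List, Tuple
--
-- def inversion_count_and_involvement(perm: List[int]) -> Tuple[int, List[int]]:
--     n = len(perm)
--
--     # inversion count by merge sort (count cross pairs left > right while merging)
--     def sort_count(xs):
--         m = len(xs)
--         if m <= 1:
--             return xs, 0
--         left, cl = sort_count(xs[: m // 2])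
--         right, cr = sort_count(xs[m // 2 :])
--         merged = []
--         cross = 0
--         i = j = 0
--         while i < len(left) and j < len(right):
--             if left[i] <= right[j]:
--                 merged.append(left[i])
--                 i += 1
--             else:
--                 cross += len(left) - i
--                 merged.append(right[j])
--                 j += 1
--         merged.extend(left[i:])
--         merged.extend(right[j:])
--         return merged, cl + cr + cross
--
--     _, inv = sort_count(perm)
--
--     # per-element involvement (documented n <= 2000 cap, else zeros)
--     if n <= 2000:
--         involvement = [
--             sum(1 for j in range(k) if perm[j] > perm[k])
--             + sum(1 for j in range(k + 1, n) if perm[j] < perm[k])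
--             for k in range(n)
--         ]
--     else:
--         involvement = [0] * n
--     return inv, involvement
-- ===== Notes on version B (the rewrite author's own statement) =====
-- stated objective: alternative
-- what changed: A's Fenwick/BIT counter with coordinate compression is replaced by a merge-sort inversion count, and A's nested pair loop with in-place double updates for involvement is replaced by per-element closed-form counts (smaller-to-left-greater plus greater-to-right-smaller), keeping the documented n<=2000 involvement cap.
import Mathlib
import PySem

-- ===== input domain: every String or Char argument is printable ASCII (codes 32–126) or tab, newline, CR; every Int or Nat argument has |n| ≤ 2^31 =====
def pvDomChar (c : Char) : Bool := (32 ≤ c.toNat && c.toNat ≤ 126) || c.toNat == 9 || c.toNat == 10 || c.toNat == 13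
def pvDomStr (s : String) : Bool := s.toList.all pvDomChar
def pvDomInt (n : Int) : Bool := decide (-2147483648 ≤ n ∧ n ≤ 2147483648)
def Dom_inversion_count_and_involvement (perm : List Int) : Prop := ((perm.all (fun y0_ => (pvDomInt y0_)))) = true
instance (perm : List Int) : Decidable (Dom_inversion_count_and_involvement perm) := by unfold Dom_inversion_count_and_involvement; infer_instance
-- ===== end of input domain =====

-- B replaces A's Fenwick-tree inversion counter by a merge-sort count and A's nested
-- pair loop for involvement by per-element closed-form counts (alternative algorithm,
-- same values; the documented n ≤ 2000 involvement cap is part of the behaviour).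

-- ===== PORT A =====
-- 'while i < len(bit): bit[i] += v; i += i & -i' — fuel-bounded loop; fuel = len(bit)
-- suffices for every call A makes (i starts at a rank ≥ 1 and strictly increases).
-- 'i & -i' is ported exactly as Int.land i (-i).
def pvBitAdd : Nat → List Int → Int → Int → List Int
  | 0, bit, _, _ => bit
  | fuel+1, bit, i, v =>
    if i < (bit.length : Int) then
      pvBitAdd fuel (PySem.List.pySetD bit i (PySem.List.pyGetD bit i 0 + v)) (i + Int.land i (-i)) v
    else bit

-- 's = 0; while i > 0: s += bit[i]; i -= i & -i' — fuel = len(bit) suffices (i ≤ rank < len(bit), decreases).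
def pvBitSum : Nat → List Int → Int → Int → Int
  | 0, _, _, s => s
  | fuel+1, bit, i, s =>
    if 0 < i then pvBitSum fuel bit (i - Int.land i (-i)) (s + PySem.List.pyGetD bit i 0)
    else s

def inversion_count_and_involvement (perm : List Int) : Int × List Int :=
  let n : Int := (perm.length : Int)
  if n ≤ 1 then (0, List.replicate perm.length 0)
  else
    let vals := PySem.List.sorted (PySem.Set.ofList perm) (fun x => x) false
    let rank := (PySem.List.enumerate vals 0).foldl
      (fun (d : PySem.Dict Int Int) p => d.insert p.2 (p.1 + 1)) PySem.Dict.empty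
    let bit0 : List Int := List.replicate (vals.length + 2) 0
    -- 'for x in perm: rx = rank[x]; inv += seen - bit_sum(rx); bit_add(rx, 1); seen += 1'
    -- (rank[x] never raises: every x of perm is a key; ported as getD with an unused default)
    let st := perm.foldl
      (fun (st : List Int × Int × Int) x =>
        let rx := PySem.Dict.getD rank x 0
        (pvBitAdd st.1.length st.1 rx 1,
         st.2.1 + (st.2.2 - pvBitSum st.1.length st.1 rx 0),
         st.2.2 + 1))
      (bit0, 0, 0)
    let involvement0 : List Int := List.replicate perm.length 0
    let involvement :=
      if n ≤ 2000 then
        (PySem.List.pyRange 0 n 1).foldl (fun acc a =>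
          (PySem.List.pyRange (a+1) n 1).foldl (fun acc2 b =>
            if PySem.List.pyGetD perm b 0 < PySem.List.pyGetD perm a 0 then
              let acc3 := PySem.List.pySetD acc2 a (PySem.List.pyGetD acc2 a 0 + 1)
              PySem.List.pySetD acc3 b (PySem.List.pyGetD acc3 b 0 + 1)
            else acc2) acc) involvement0
      else involvement0
    (st.2.1, involvement)

-- ===== PORT B =====
-- merge two runs, counting cross pairs (left element > right element)
def pvMergeCount : List Int → List Int → List Int × Int
  | [], ys => (ys, 0)
  | x :: xs, [] => (x :: xs, 0)
  | x :: xs, y :: ys =>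
    if x ≤ y then
      let r := pvMergeCount xs (y :: ys)
      (x :: r.1, r.2)
    else
      let r := pvMergeCount (x :: xs) ys
      (y :: r.1, r.2 + ((xs.length : Int) + 1))

def pvSortCount (xs : List Int) : List Int × Int :=
  if h : xs.length ≤ 1 then (xs, 0)
  else
    let l := pvSortCount (xs.take (xs.length / 2))
    let r := pvSortCount (xs.drop (xs.length / 2))
    let m := pvMergeCount l.1 r.1
    (m.1, l.2 + r.2 + m.2)
termination_by xs.length
decreasing_by
  · simp only [List.length_take]; omega
  · simp only [List.length_drop]; omega

def inversion_count_and_involvement_alt (perm : List Int) : Int × List Int :=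
  let n := perm.length
  let inv := (pvSortCount perm).2
  let involvement : List Int :=
    if (n : Int) ≤ 2000 then
      (List.range n).map (fun k =>
        (((List.range k).countP (fun j => decide (perm.getD k 0 < perm.getD j 0)) : Nat) : Int) +
        ((((List.range n).drop (k+1)).countP (fun j => decide (perm.getD j 0 < perm.getD k 0)) : Nat) : Int))
    else List.replicate n 0
  (inv, involvement)

-- ===== PRECONDITION & SPEC =====
def Spec_inversion_count_and_involvement (perm : List Int) (out : Int × List Int) : Prop := out = inversion_count_and_involvement_alt perm
instance (perm : List Int) (out : Int × List Int) : Decidable (Spec_inversion_count_and_involvement perm out) := by unfold Spec_inversion_count_and_involvement; infer_instance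

-- ===== CLAIM (what is proved, stated in full; the proofs are below) =====
def Claim_equal_inversion_count_and_involvement : Prop := ∀ (perm : List Int), Dom_inversion_count_and_involvement perm → Spec_inversion_count_and_involvement perm (inversion_count_and_involvement perm)

-- ===== LEMMAS AND PROOFS =====

def lbN (p : Nat) : Nat := Nat.ldiff p (p - 1)

theorem lbN_zero : lbN 0 = 0 := by
  apply Nat.eq_of_testBit_eq; intro i
  simp [lbN, Nat.testBit_ldiff]

theorem lbN_odd (p : Nat) (h : p % 2 = 1) : lbN p = 1 := by
  apply Nat.eq_of_testBit_eq; intro i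
  rw [lbN, Nat.testBit_ldiff]
  cases i with
  | zero =>
      rw [Nat.testBit_zero, Nat.testBit_zero, Nat.testBit_zero]
      simp [h]; omega
  | succ i =>
      rw [Nat.testBit_succ, Nat.testBit_succ, Nat.testBit_succ]
      have h2 : (p - 1) / 2 = p / 2 := by omega
      have h3 : (1 : Nat) / 2 = 0 := by norm_num
      rw [h2, h3]
      simp

theorem lbN_even (p : Nat) (h : p % 2 = 0) (hp : 0 < p) : lbN p = 2 * lbN (p / 2) := by
  apply Nat.eq_of_testBit_eq; intro i
  rw [lbN, Nat.testBit_ldiff]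
  cases i with
  | zero =>
      rw [Nat.testBit_zero, Nat.testBit_zero, Nat.testBit_zero]
      simp [h]
  | succ i =>
      rw [Nat.testBit_succ, Nat.testBit_succ, Nat.testBit_succ]
      have h2 : (p - 1) / 2 = p / 2 - 1 := by omega
      have h3 : 2 * lbN (p / 2) / 2 = lbN (p / 2) := by omega
      rw [h2, h3, lbN, Nat.testBit_ldiff]

theorem lbN_pos (p : Nat) (hp : 0 < p) : 0 < lbN p := by
  induction p using Nat.strong_induction_on with
  | _ p ih =>
    rcases Nat.mod_two_eq_zero_or_one p with h | h
    · rw [lbN_even p h hp]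
      have := ih (p / 2) (by omega) (by omega)
      omega
    · rw [lbN_odd p h]; omega

theorem lbN_dvd (p : Nat) : lbN p ∣ p := by
  induction p using Nat.strong_induction_on with
  | _ p ih =>
    rcases Nat.eq_zero_or_pos p with rfl | hp
    · simp
    rcases Nat.mod_two_eq_zero_or_one p with h | h
    · rw [lbN_even p h hp]
      obtain ⟨c, hc⟩ := ih (p / 2) (by omega)
      refine ⟨c, ?_⟩
      have hr : 2 * (lbN (p / 2) * c) = 2 * lbN (p / 2) * c := by ring
      omega
    · rw [lbN_odd p h]; omega

theorem lbN_pow (p : Nat) (hp : 0 < p) : ∃ k, lbN p = 2 ^ k := by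
  induction p using Nat.strong_induction_on with
  | _ p ih =>
    rcases Nat.mod_two_eq_zero_or_one p with h | h
    · obtain ⟨k, hk⟩ := ih (p / 2) (by omega) (by omega)
      exact ⟨k + 1, by rw [lbN_even p h hp, hk]; ring⟩
    · exact ⟨0, by rw [lbN_odd p h]; norm_num⟩

theorem not_two_lbN_dvd (p : Nat) (hp : 0 < p) : ¬ (2 * lbN p ∣ p) := by
  induction p using Nat.strong_induction_on with
  | _ p ih =>
    rcases Nat.mod_two_eq_zero_or_one p with h | h
    · rw [lbN_even p h hp]
      intro hd
      obtain ⟨c, hc⟩ := hd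
      have hc2 : 2 * (2 * lbN (p / 2)) * c = 2 * (2 * lbN (p / 2) * c) := by ring
      exact ih (p / 2) (by omega) (by omega) ⟨c, by omega⟩
    · rw [lbN_odd p h]
      intro hd; obtain ⟨c, hc⟩ := hd; omega

theorem pow_dvd_lbN (p k : Nat) (hp : 0 < p) (hd : 2 ^ k ∣ p) : 2 ^ k ∣ lbN p := by
  induction k generalizing p with
  | zero => simpa using Nat.one_dvd _
  | succ k ih =>
    obtain ⟨c, hc⟩ := hd
    have hc2 : p = 2 * (2 ^ k * c) := by rw [hc]; ring
    have h2 : p % 2 = 0 := by omega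
    rw [lbN_even p h2 hp]
    have hdk : 2 ^ k ∣ p / 2 := ⟨c, by omega⟩
    obtain ⟨c', hc'⟩ := ih (p / 2) (by omega) hdk
    refine ⟨c', ?_⟩
    have hr : 2 ^ (k + 1) * c' = 2 * (2 ^ k * c') := by ring
    omega

theorem lbN_le (p : Nat) (hp : 0 < p) : lbN p ≤ p := Nat.le_of_dvd hp (lbN_dvd p)

theorem pow2_dvd_of_le {a b : Nat} (ha : ∃ k, a = 2 ^ k) (hb : ∃ k, b = 2 ^ k)
    (h : a ≤ b) : a ∣ b := by
  obtain ⟨j, rfl⟩ := ha; obtain ⟨k, rfl⟩ := hb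
  exact pow_dvd_pow 2 ((Nat.pow_le_pow_iff_right (by norm_num)).mp h)

theorem pow2_two_mul_dvd_of_lt {a b : Nat} (ha : ∃ k, a = 2 ^ k) (hb : ∃ k, b = 2 ^ k)
    (h : a < b) : 2 * a ∣ b := by
  obtain ⟨j, rfl⟩ := ha; obtain ⟨k, rfl⟩ := hb
  have hjk : j < k := (Nat.pow_lt_pow_iff_right (by norm_num)).mp h
  have : (2 : Nat) * 2 ^ j = 2 ^ (j + 1) := by ring
  rw [this]
  exact pow_dvd_pow 2 (by omega)

-- p - lbN p is an even multiple of lbN p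
theorem two_lbN_dvd_sub (p : Nat) (hp : 0 < p) : 2 * lbN p ∣ p - lbN p := by
  obtain ⟨q, hq⟩ := lbN_dvd p
  have hodd : q % 2 = 1 := by
    rcases Nat.mod_two_eq_zero_or_one q with h | h
    · exfalso
      apply not_two_lbN_dvd p hp
      refine ⟨q / 2, ?_⟩
      have h2 : lbN p * (2 * (q / 2)) = 2 * lbN p * (q / 2) := by ring
      have h3 : lbN p * (2 * (q / 2)) = lbN p * q := by congr 1; omega
      omega
    · exact h
  refine ⟨(q - 1) / 2, ?_⟩
  have h1 : lbN p * q ≥ lbN p := by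
    have := lbN_pos p hp
    have hq1 : 1 ≤ q := by
      rcases Nat.eq_zero_or_pos q with rfl | h; · omega
      · omega
    calc lbN p = lbN p * 1 := by ring
      _ ≤ lbN p * q := Nat.mul_le_mul_left _ hq1
  have h2 : 2 * lbN p * ((q - 1) / 2) = lbN p * (2 * ((q - 1) / 2)) := by ring
  have h3 : 2 * ((q - 1) / 2) = q - 1 := by omega
  rw [h2, h3]
  have h4 : lbN p * (q - 1) = lbN p * q - lbN p * 1 := by
    rw [Nat.mul_sub]
  omega

theorem lbN_add_of_lt (r s : Nat) (hs : 0 < s) (h : s < lbN r) : lbN (r + s) = lbN s := by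
  have hr : 0 < r := by
    by_contra hc
    interval_cases r <;> simp [lbN_zero] at h <;> omega
  have hlbs := lbN_pos s hs
  have hlbsle := lbN_le s hs
  have hdvdlb : 2 * lbN s ∣ lbN r :=
    pow2_two_mul_dvd_of_lt (lbN_pow s hs) (lbN_pow r hr) (by omega)
  have hdvdr : lbN s ∣ r := dvd_trans (⟨2, by ring⟩ : lbN s ∣ 2 * lbN s) (dvd_trans hdvdlb (lbN_dvd r))
  have hdvdsum : lbN s ∣ r + s := Nat.dvd_add hdvdr (lbN_dvd s)
  obtain ⟨k, hk⟩ := lbN_pow s hs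
  have h1 : lbN s ∣ lbN (r + s) := by
    rw [hk] at hdvdsum ⊢
    exact pow_dvd_lbN (r + s) k (by omega) hdvdsum
  -- lbN (r+s) cannot reach 2 * lbN s
  have h2 : lbN (r + s) ≤ lbN s := by
    by_contra hc
    push Not at hc
    have hdd : 2 * lbN s ∣ lbN (r + s) :=
      pow2_two_mul_dvd_of_lt (lbN_pow s hs) (lbN_pow (r + s) (by omega)) hc
    have hdd2 : 2 * lbN s ∣ r + s := dvd_trans hdd (lbN_dvd (r + s))
    have hdd3 : 2 * lbN s ∣ r := dvd_trans hdvdlb (lbN_dvd r)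
    have hdds : 2 * lbN s ∣ s := (Nat.dvd_add_right hdd3).mp hdd2
    exact not_two_lbN_dvd s hs hdds
  exact Nat.dvd_antisymm (pow2_dvd_of_le (lbN_pow (r + s) (by omega)) (lbN_pow s hs) h2) h1


-- the Fenwick 'ascend chain' step: for p ≠ r the rest of the chain covers p iff the whole chain does
theorem hits_step (r p : Nat) (hr : 0 < r) (hne : p ≠ r) :
    (r + lbN r ≤ p ∧ p - lbN p < r + lbN r) ↔ (r ≤ p ∧ p - lbN p < r) := by
  have hlbr := lbN_pos r hr
  constructor
  · rintro ⟨h1, h2⟩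
    have hp : 0 < p := by omega
    have hlbp := lbN_pos p hp
    have hlbple := lbN_le p hp
    refine ⟨by omega, ?_⟩
    by_contra hc
    push Not at hc
    have hsub := two_lbN_dvd_sub p hp
    rcases Nat.eq_or_lt_of_le hc with heq | hlt
    · have hlbpr : lbN p = p - r := by omega
      have hge : lbN r ≤ lbN p := by omega
      have hdd : 2 * lbN p ∣ r := by rw [heq]; exact hsub
      have hdd2 : 2 * lbN p ∣ lbN r := by
        obtain ⟨k, hk⟩ := lbN_pow p hp
        have h2k : (2 : Nat) * 2 ^ k = 2 ^ (k + 1) := by ring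
        rw [hk, h2k] at hdd ⊢
        exact pow_dvd_lbN r (k + 1) hr hdd
      have := Nat.le_of_dvd hlbr hdd2
      omega
    · set t := p - lbN p - r with ht
      have htpos : 0 < t := by omega
      have htlt : t < lbN r := by omega
      have hrt : p - lbN p = r + t := by omega
      have hlbt := lbN_pos t htpos
      have hlbtle := lbN_le t htpos
      have hlbrt : lbN (r + t) = lbN t := lbN_add_of_lt r t htpos htlt
      have hdd : 2 * lbN p ∣ lbN t := by
        obtain ⟨k, hk⟩ := lbN_pow p hp
        have h2k : (2 : Nat) * 2 ^ k = 2 ^ (k + 1) := by ring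
        rw [hrt] at hsub
        rw [hk, h2k] at hsub ⊢
        have := pow_dvd_lbN (r + t) (k + 1) (by omega) hsub
        rwa [hlbrt] at this
      have hle1 : 2 * lbN p ≤ lbN t := Nat.le_of_dvd hlbt hdd
      have hdlt : lbN t ∣ lbN r :=
        pow2_dvd_of_le (lbN_pow t htpos) (lbN_pow r hr) (by omega)
      have hdiff : lbN t ∣ lbN r - t := Nat.dvd_sub hdlt (lbN_dvd t)
      have hge : lbN r - t ≥ lbN t := Nat.le_of_dvd (by omega) hdiff
      omega
  · rintro ⟨h1, h2⟩
    have hrp : r < p := by omega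
    refine ⟨?_, by omega⟩
    by_contra hc
    push Not at hc
    set s := p - r with hs
    have hspos : 0 < s := by omega
    have hslt : s < lbN r := by omega
    have hps : p = r + s := by omega
    have hlbp : lbN p = lbN s := by rw [hps]; exact lbN_add_of_lt r s hspos hslt
    have := lbN_le s hspos
    omega

-- bridge: Python's i & -i on a positive int is the lowest set bit
theorem land_bridge (n : Nat) (h : 0 < n) : Int.land (n : Int) (-(n : Int)) = (lbN n : Int) := by
  obtain ⟨m, rfl⟩ : ∃ m, n = m + 1 := ⟨n - 1, by omega⟩
  rfl

-- mathematical descent sum along the Fenwick chain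
def hsum (bit : List Int) (i : Nat) : Int :=
  if h : 0 < i then bit.getD i 0 + hsum bit (i - lbN i) else 0
termination_by i
decreasing_by have := lbN_pos i h; omega

theorem hsum_zero (bit : List Int) : hsum bit 0 = 0 := by rw [hsum]; norm_num

theorem hsum_pos (bit : List Int) (i : Nat) (h : 0 < i) :
    hsum bit i = bit.getD i 0 + hsum bit (i - lbN i) := by rw [hsum]; rw [dif_pos h]

theorem countP_add_countP {α : Type} (l : List α) (f g h : α → Bool)
    (H : ∀ x ∈ l, ((h x = true) ↔ (f x = true ∨ g x = true)) ∧ ¬(f x = true ∧ g x = true)) :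
    l.countP f + l.countP g = l.countP h := by
  induction l with
  | nil => simp
  | cons a l ih =>
    have Ha := H a (List.mem_cons_self ..)
    have ih' := ih (fun x hx => H x (List.mem_cons_of_mem a hx))
    simp only [List.countP_cons]
    by_cases hf : f a = true
    · have hh : h a = true := Ha.1.mpr (Or.inl hf)
      have hg : ¬ g a = true := fun hg => Ha.2 ⟨hf, hg⟩
      rw [if_pos hf, if_pos hh, if_neg hg]
      omega
    · by_cases hg : g a = true
      · have hh : h a = true := Ha.1.mpr (Or.inr hg)
        rw [if_pos hg, if_pos hh, if_neg hf]
        omega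
      · have hh : ¬ h a = true := fun hh => (Ha.1.mp hh).elim hf hg
        rw [if_neg hf, if_neg hg, if_neg hh]
        omega

theorem pvBitSum_eq (bit : List Int) : ∀ (fuel : Nat) (i : Nat) (s : Int), i ≤ fuel →
    pvBitSum fuel bit (i : Int) s = s + hsum bit i := by
  intro fuel
  induction fuel with
  | zero =>
    intro i s hi
    interval_cases i
    have h1 : pvBitSum 0 bit ((0 : Nat) : Int) s = s := rfl
    rw [h1, hsum_zero]; ring
  | succ fuel ih =>
    intro i s hi
    rcases Nat.eq_zero_or_pos i with rfl | hpos
    · have h1 : pvBitSum (fuel + 1) bit ((0 : Nat) : Int) s = s := by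
        rw [pvBitSum]; norm_num
      rw [h1, hsum_zero]; ring
    · have hlb := lbN_pos i hpos
      have hle := lbN_le i hpos
      rw [pvBitSum, if_pos (by exact_mod_cast hpos)]
      have hcast : (i : Int) - Int.land (i : Int) (-(i : Int)) = ((i - lbN i : Nat) : Int) := by
        rw [land_bridge i hpos]
        omega
      rw [hcast, ih (i - lbN i) _ (by omega), hsum_pos bit i hpos]
      simp [PySem.List.pyGetD_natCast]
      ring

theorem pvBitAdd_spec (v : Int) : ∀ (fuel : Nat) (bit : List Int) (r : Nat), 0 < r →
    bit.length ≤ fuel + r →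
    (pvBitAdd fuel bit (r : Int) v).length = bit.length ∧
    ∀ p : Nat, p < bit.length →
      (pvBitAdd fuel bit (r : Int) v).getD p 0 =
        bit.getD p 0 + (if r ≤ p ∧ p - lbN p < r then v else 0) := by
  intro fuel
  induction fuel with
  | zero =>
    intro bit r hr hlen
    refine ⟨rfl, fun p hp => ?_⟩
    have h1 : pvBitAdd 0 bit (r : Int) v = bit := rfl
    rw [h1, if_neg (by rintro ⟨hc1, _⟩; omega)]
    ring
  | succ fuel ih =>
    intro bit r hr hlen
    rw [pvBitAdd]
    by_cases hlt : (r : Int) < (bit.length : Int)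
    · rw [if_pos hlt]
      have hrlen : r < bit.length := by exact_mod_cast hlt
      have hlbr := lbN_pos r hr
      set w := PySem.List.pyGetD bit (r : Int) 0 + v with hw
      set bit' := PySem.List.pySetD bit (r : Int) w with hbit'
      have hlen' : bit'.length = bit.length := by
        simp [hbit', PySem.List.pySetD_natCast]
      have harg : (r : Int) + Int.land (r : Int) (-(r : Int)) = ((r + lbN r : Nat) : Int) := by
        rw [land_bridge r hr]; push_cast; ring
      rw [harg]
      have hrec := ih bit' (r + lbN r) (by omega) (by omega)
      refine ⟨by rw [hrec.1, hlen'], ?_⟩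
      intro p hp
      rw [hrec.2 p (by omega)]
      have hget : bit'.getD p 0 = bit.getD p 0 + (if p = r then v else 0) := by
        simp only [hbit', hw, PySem.List.pySetD_natCast, PySem.List.pyGetD_natCast]
        by_cases hpr : p = r
        · subst hpr
          rw [if_pos rfl]
          have h1 : (bit.set p (bit.getD p 0 + v)).getD p 0 = bit.getD p 0 + v := by
            rw [List.getD_eq_getElem?_getD, List.getElem?_set_self (by omega)]
            rfl
          rw [h1]
        · rw [if_neg hpr]
          have h1 : (bit.set r (bit.getD r 0 + v)).getD p 0 = bit.getD p 0 := by
            rw [List.getD_eq_getElem?_getD, List.getElem?_set_ne (by omega),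
              ← List.getD_eq_getElem?_getD]
          rw [h1]
          ring
      rw [hget]
      by_cases hpr : p = r
      · subst hpr
        rw [if_pos rfl, if_neg (by rintro ⟨h1, _⟩; omega), if_pos ⟨le_rfl, by omega⟩]
        ring
      · rw [if_neg hpr]
        have hiff := hits_step r p hr hpr
        by_cases hh : r ≤ p ∧ p - lbN p < r
        · rw [if_pos (hiff.mpr hh), if_pos hh]; ring
        · rw [if_neg (fun hc => hh (hiff.mp hc)), if_neg hh]; ring
    · rw [if_neg hlt]
      have hble : bit.length ≤ r := by
        have h2 : (bit.length : Int) ≤ (r : Int) := by omega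
        exact_mod_cast h2
      refine ⟨rfl, fun p hp => ?_⟩
      rw [if_neg (by rintro ⟨hc1, _⟩; omega)]
      ring

def hitsB (r p : Nat) : Bool := decide (r ≤ p ∧ p - lbN p < r)

theorem hsum_eq_count (g : Int → Nat) (pre : List Int) (bit : List Int)
    (hgp : ∀ x ∈ pre, 0 < g x) :
    ∀ i, i < bit.length →
    (∀ p : Nat, 0 < p → p ≤ i → bit.getD p 0 = (pre.countP (fun y => hitsB (g y) p) : Int)) →
    hsum bit i = (pre.countP (fun y => decide (g y ≤ i)) : Int) := by
  intro i
  induction i using Nat.strong_induction_on with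
  | _ i ih =>
    intro hi hbit
    rcases Nat.eq_zero_or_pos i with rfl | hpos
    · rw [hsum_zero]
      have : pre.countP (fun y => decide (g y ≤ 0)) = 0 :=
        List.countP_eq_zero.mpr (fun y hy => by
          have := hgp y hy; simp; omega)
      rw [this]; rfl
    · have hlb := lbN_pos i hpos
      have hle := lbN_le i hpos
      rw [hsum_pos _ _ hpos, hbit i hpos le_rfl,
        ih (i - lbN i) (by omega) (by omega) (fun p hp hple => hbit p hp (by omega))]
      have hcomb := countP_add_countP pre (fun y => hitsB (g y) i)
        (fun y => decide (g y ≤ i - lbN i)) (fun y => decide (g y ≤ i)) ?_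
      · exact_mod_cast congrArg (fun n : Nat => (n : Int)) hcomb
      · intro y hy
        have := hgp y hy
        simp only [hitsB, decide_eq_true_iff]
        omega

-- canonical inversion count: pairs (i < j) with l[i] > l[j]
def invC : List Int → Nat
  | [] => 0
  | x :: xs => xs.countP (fun y => decide (y < x)) + invC xs

theorem invC_append_singleton (l : List Int) (x : Int) :
    invC (l ++ [x]) = invC l + l.countP (fun y => decide (x < y)) := by
  induction l with
  | nil => simp [invC]
  | cons a l ih =>
    simp only [List.cons_append, invC, List.countP_append, ih, List.countP_cons,
      List.countP_nil]
    by_cases hxa : x < a <;> simp only [hxa, decide_true, decide_false] <;> omega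

theorem countP_not_aux {α : Type} (l : List α) (p : α → Bool) :
    l.countP p + l.countP (fun y => !(p y)) = l.length := by
  induction l with
  | nil => simp
  | cons a l ih =>
    simp only [List.countP_cons, List.length_cons]
    by_cases h : p a = true
    · rw [if_pos h, if_neg (by simp [h])]; omega
    · rw [if_neg h, if_pos (by simp [Bool.not_eq_true'] at h ⊢; exact h)]; omega

-- one step of A's main loop, with the rank lookup abstracted into g
def stepA (g : Int → Nat) (st : List Int × Int × Int) (x : Int) : List Int × Int × Int :=
  (pvBitAdd st.1.length st.1 ((g x : Nat) : Int) 1,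
   st.2.1 + (st.2.2 - pvBitSum st.1.length st.1 ((g x : Nat) : Int) 0),
   st.2.2 + 1)

theorem foldA_inv (g : Int → Nat) (m : Nat) (l : List Int)
    (hg : ∀ x ∈ l, 0 < g x ∧ g x + 1 < m)
    (hmono : ∀ x ∈ l, ∀ y ∈ l, (g y ≤ g x ↔ y ≤ x)) :
    ((l.foldl (stepA g) (List.replicate m 0, 0, 0)).1.length = m) ∧
    (∀ p : Nat, p < m → (l.foldl (stepA g) (List.replicate m 0, 0, 0)).1.getD p 0
        = (l.countP (fun y => hitsB (g y) p) : Int)) ∧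
    ((l.foldl (stepA g) (List.replicate m 0, 0, 0)).2.1 = (invC l : Int)) ∧
    ((l.foldl (stepA g) (List.replicate m 0, 0, 0)).2.2 = (l.length : Int)) := by
  induction l using List.reverseRecOn with
  | nil =>
    refine ⟨by simp, fun p hp => ?_, by simp [invC], by simp⟩
    simp only [List.foldl_nil, List.countP_nil]
    rw [List.getD_eq_getElem?_getD, List.getElem?_replicate]
    split <;> rfl
  | append_singleton l x ih =>
    have hgx := hg x (by simp)
    have hgl : ∀ x' ∈ l, 0 < g x' ∧ g x' + 1 < m :=
      fun x' hx' => hg x' (by simp [hx'])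
    have hmonol : ∀ a ∈ l, ∀ b ∈ l, (g b ≤ g a ↔ b ≤ a) :=
      fun a ha b hb => hmono a (by simp [ha]) b (by simp [hb])
    obtain ⟨ihlen, ihbit, ihinv, ihseen⟩ := ih hgl hmonol
    rw [List.foldl_append, List.foldl_cons, List.foldl_nil]
    set st := l.foldl (stepA g) (List.replicate m 0, 0, 0) with hst
    have hsum1 : pvBitSum st.1.length st.1 ((g x : Nat) : Int) 0
        = (l.countP (fun y => decide (g y ≤ g x)) : Int) := by
      rw [pvBitSum_eq st.1 st.1.length (g x) 0 (by omega)]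
      rw [hsum_eq_count g l st.1 (fun y hy => (hgl y hy).1) (g x) (by omega)
        (fun p hp hple => ihbit p (by omega))]
      ring
    have hadd := pvBitAdd_spec 1 st.1.length st.1 (g x) hgx.1 (by omega)
    refine ⟨?_, ?_, ?_, ?_⟩
    · show (pvBitAdd st.1.length st.1 ((g x : Nat) : Int) 1).length = m
      rw [hadd.1, ihlen]
    · intro p hp
      show (pvBitAdd st.1.length st.1 ((g x : Nat) : Int) 1).getD p 0 = _
      rw [hadd.2 p (by omega), ihbit p hp, List.countP_append]
      simp only [List.countP_cons, List.countP_nil, hitsB]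
      by_cases hh : g x ≤ p ∧ p - lbN p < g x
      · rw [if_pos hh, if_pos (by simpa using hh)]
        push_cast; ring
      · rw [if_neg hh, if_neg (by simpa using hh)]
        push_cast; ring
    · show st.2.1 + (st.2.2 - pvBitSum st.1.length st.1 ((g x : Nat) : Int) 0) = _
      rw [hsum1, ihinv, ihseen, invC_append_singleton]
      have hcnt : l.countP (fun y => decide (g y ≤ g x))
          + l.countP (fun y => decide (x < y)) = l.length := by
        have hcg : l.countP (fun y => decide (x < y))
            = l.countP (fun y => !(decide (g y ≤ g x))) := by
          apply List.countP_congr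
          intro y hy
          have hiff := hmono x (by simp) y (by simp [hy])
          by_cases hxy : x < y
          · have h1 : decide (x < y) = true := by simp [hxy]
            have h2 : decide (g y ≤ g x) = false := by
              simp only [decide_eq_false_iff_not]
              exact fun hc => absurd (hiff.mp hc) (not_le.mpr hxy)
            rw [h1, h2]; rfl
          · have h1 : decide (x < y) = false := by simp [hxy]
            have h2 : decide (g y ≤ g x) = true := by
              simp only [decide_eq_true_iff]
              exact hiff.mpr (not_lt.mp hxy)
            rw [h1, h2]; rfl
        rw [hcg]
        exact countP_not_aux l _
      push_cast
      omega
    · show st.2.2 + 1 = _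
      rw [ihseen]
      simp only [List.length_append, List.length_cons, List.length_nil]
      push_cast; ring

theorem A_fst (perm : List Int) :
    (inversion_count_and_involvement perm).1 = (invC perm : Int) := by
  by_cases hn : (perm.length : Int) ≤ 1
  · have hlen : perm.length ≤ 1 := by exact_mod_cast hn
    match perm, hlen with
    | [], _ => simp [inversion_count_and_involvement, invC]
    | [a], _ => simp [inversion_count_and_involvement, invC]
  · simp only [inversion_count_and_involvement]
    rw [if_neg hn]
    set vals := PySem.List.sorted (PySem.Set.ofList perm) (fun x => x) false with hvals
    set rank := (PySem.List.enumerate vals 0).foldl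
      (fun (d : PySem.Dict Int Int) p => d.insert p.2 (p.1 + 1)) PySem.Dict.empty with hrank
    set g : Int → Nat := fun x => vals.idxOf x + 1 with hgdef
    have hpair : vals.Pairwise (· < ·) := PySem.List.sorted_ofList_pairwise_lt perm
    have hnodup : vals.Nodup := hpair.imp ne_of_lt
    have hmemv : ∀ x : Int, x ∈ vals ↔ x ∈ perm := by
      intro x
      rw [hvals, PySem.List.mem_sorted, PySem.Set.mem_ofList]
    have hidx : ∀ x ∈ perm, vals.idxOf x < vals.length :=
      fun x hx => List.idxOf_lt_length_of_mem ((hmemv x).mpr hx)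
    have hgetidx : ∀ (x : Int) (h : vals.idxOf x < vals.length), x ∈ perm →
        vals[vals.idxOf x] = x := by
      intro x h hx
      exact List.getElem_idxOf h
    have hstrict : ∀ i j (hi : i < vals.length) (hj : j < vals.length), i < j →
        vals[i] < vals[j] :=
      fun i j hi hj hij => List.pairwise_iff_getElem.mp hpair i j hi hj hij
    have hmono : ∀ x ∈ perm, ∀ y ∈ perm, (g y ≤ g x ↔ y ≤ x) := by
      intro x hx y hy
      have hix := hidx x hx
      have hiy := hidx y hy
      have hgx := hgetidx x hix hx
      have hgy := hgetidx y hiy hy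
      constructor
      · intro h
        have hidxle : vals.idxOf y ≤ vals.idxOf x := by simp only [hgdef] at h; omega
        rcases Nat.eq_or_lt_of_le hidxle with heq | hlt
        · have h1 : vals[vals.idxOf y]? = some y := by
            rw [List.getElem?_eq_getElem hiy, hgy]
          have h2 : vals[vals.idxOf x]? = some x := by
            rw [List.getElem?_eq_getElem hix, hgx]
          rw [heq] at h1
          have h3 := h1.symm.trans h2
          injection h3 with h4
          omega
        · have := hstrict _ _ hiy hix hlt
          rw [hgy, hgx] at this
          omega
      · intro h
        by_contra hc
        have hlt : vals.idxOf x < vals.idxOf y := by simp only [hgdef] at hc; omega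
        have := hstrict _ _ hix hiy hlt
        rw [hgy, hgx] at this
        omega
    have hitems : rank.items = (PySem.List.enumerate vals 0).map (fun p => (p.2, p.1 + 1)) := by
      rw [hrank]
      rw [PySem.Dict.items_foldl_insert_fresh (PySem.List.enumerate vals 0)
        (fun p => p.2) (fun p => p.1 + 1) PySem.Dict.empty
        (fun a _ => PySem.Dict.contains_empty _)
        (by rw [PySem.List.map_snd_enumerate]; exact hnodup)]
      rfl
    have hkeys : rank.keys = vals := by
      show rank.items.map (·.1) = vals
      rw [hitems, List.map_map]
      have : ((fun p : Int × Int => p.1) ∘ (fun p : Int × Int => (p.2, p.1 + 1)))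
          = (fun p : Int × Int => p.2) := rfl
      rw [this, PySem.List.map_snd_enumerate]
    have hrankD : ∀ x ∈ perm, PySem.Dict.getD rank x 0 = ((g x : Nat) : Int) := by
      intro x hx
      have hix := hidx x hx
      have hmem : (((vals.idxOf x : Nat) : Int), x) ∈ PySem.List.enumerate vals 0 := by
        rw [PySem.List.mem_enumerate_iff]
        exact ⟨vals.idxOf x, hix, by rw [hgetidx x hix hx]; simp⟩
      have hpairmem : (x, ((vals.idxOf x : Nat) : Int) + 1) ∈ rank.items := by
        rw [hitems]
        exact List.mem_map.mpr ⟨_, hmem, rfl⟩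
      rw [PySem.Dict.getD_of_mem_items rank hpairmem (by rw [hkeys]; exact hnodup) 0]
      simp only [hgdef]
      push_cast
      ring
    have hcongr : perm.foldl
        (fun (st : List Int × Int × Int) x =>
          (pvBitAdd st.1.length st.1 (PySem.Dict.getD rank x 0) 1,
           st.2.1 + (st.2.2 - pvBitSum st.1.length st.1 (PySem.Dict.getD rank x 0) 0),
           st.2.2 + 1))
        (List.replicate (vals.length + 2) 0, 0, 0)
        = perm.foldl (stepA g) (List.replicate (vals.length + 2) 0, 0, 0) := by
      apply PySem.List.foldl_congr_mem
      intro acc x hx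
      simp only [stepA]
      rw [hrankD x hx]
    rw [hcongr]
    have hg : ∀ x ∈ perm, 0 < g x ∧ g x + 1 < vals.length + 2 := by
      intro x hx
      have := hidx x hx
      simp only [hgdef]
      omega
    exact (foldA_inv g (vals.length + 2) perm hg hmono).2.2.1

-- cross pairs between two blocks: #{(x, y) : x ∈ xs, y ∈ ys, y < x}
def crossC (xs ys : List Int) : Nat :=
  (ys.map (fun y => xs.countP (fun x => decide (y < x)))).sum

theorem crossC_nil_right (xs : List Int) : crossC xs [] = 0 := rfl

theorem crossC_cons_right (xs : List Int) (y : Int) (ys : List Int) :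
    crossC xs (y :: ys) = xs.countP (fun x => decide (y < x)) + crossC xs ys := rfl

theorem crossC_cons_left (x : Int) (xs : List Int) (ys : List Int) :
    crossC (x :: xs) ys = ys.countP (fun y => decide (y < x)) + crossC xs ys := by
  induction ys with
  | nil => rfl
  | cons y ys ih =>
    rw [crossC_cons_right, crossC_cons_right, ih]
    simp only [List.countP_cons]
    by_cases h : y < x
    · simp only [h, decide_true, if_true]; omega
    · simp only [h, decide_false, if_false]; omega

theorem crossC_nil_left (R : List Int) : crossC [] R = 0 := by
  induction R with
  | nil => rfl
  | cons y R ih => rw [crossC_cons_right, ih]; simp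

theorem invC_append (L R : List Int) :
    invC (L ++ R) = invC L + invC R + crossC L R := by
  induction L with
  | nil => simp [invC, crossC_nil_left]
  | cons x L ih =>
    simp only [List.cons_append, invC, List.countP_append, ih, crossC_cons_left]
    omega

theorem crossC_perm {L1 L2 R1 R2 : List Int} (hL : L1.Perm L2) (hR : R1.Perm R2) :
    crossC L1 R1 = crossC L2 R2 := by
  unfold crossC
  have hmap : R1.map (fun y => L1.countP (fun x => decide (y < x)))
      = R1.map (fun y => L2.countP (fun x => decide (y < x))) := by
    apply List.map_congr_left
    intro y _
    exact hL.countP_eq _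
  rw [hmap]
  exact (hR.map _).sum_eq

theorem mergeCount_spec : ∀ (n : Nat) (xs ys : List Int), xs.length + ys.length ≤ n →
    xs.Pairwise (· ≤ ·) → ys.Pairwise (· ≤ ·) →
    (pvMergeCount xs ys).1.Perm (xs ++ ys) ∧ (pvMergeCount xs ys).1.Pairwise (· ≤ ·) ∧
    (pvMergeCount xs ys).2 = (crossC xs ys : Int) := by
  intro n
  induction n with
  | zero =>
    intro xs ys hlen hxs hys
    have hx0 : xs = [] := by cases xs <;> simp_all
    have hy0 : ys = [] := by cases ys <;> simp_all
    subst hx0; subst hy0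
    exact ⟨by simp [pvMergeCount], by simp [pvMergeCount], by simp [pvMergeCount, crossC]⟩
  | succ n ih =>
    intro xs ys hlen hxs hys
    match xs, ys with
    | [], ys =>
      refine ⟨by simp [pvMergeCount], by simpa [pvMergeCount] using hys, ?_⟩
      simp [pvMergeCount, crossC_nil_left]
    | x :: xs, [] =>
      refine ⟨by simp [pvMergeCount], by simpa [pvMergeCount] using hxs, ?_⟩
      simp [pvMergeCount, crossC_nil_right]
    | x :: xs, y :: ys =>
      have hxall : ∀ z ∈ xs, x ≤ z := (List.pairwise_cons.mp hxs).1
      have hxtail : xs.Pairwise (· ≤ ·) := (List.pairwise_cons.mp hxs).2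
      have hyall : ∀ z ∈ ys, y ≤ z := (List.pairwise_cons.mp hys).1
      have hytail : ys.Pairwise (· ≤ ·) := (List.pairwise_cons.mp hys).2
      simp only [pvMergeCount]
      by_cases hxy : x ≤ y
      · rw [if_pos hxy]
        obtain ⟨hp, hs, hc⟩ := ih xs (y :: ys) (by simp at hlen ⊢; omega) hxtail hys
        refine ⟨?_, ?_, ?_⟩
        · exact (hp.cons x)
        · rw [List.pairwise_cons]
          refine ⟨?_, hs⟩
          intro b hb
          have hbmem := hp.mem_iff.mp hb
          rw [List.mem_append] at hbmem
          rcases hbmem with hbx | hby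
          · exact hxall b hbx
          · rcases List.mem_cons.mp hby with rfl | hby'
            · exact hxy
            · exact le_trans hxy (hyall b hby')
        · rw [hc, crossC_cons_left]
          have hzero : (y :: ys).countP (fun z => decide (z < x)) = 0 := by
            apply List.countP_eq_zero.mpr
            intro z hz
            rcases List.mem_cons.mp hz with rfl | hz'
            · simp; omega
            · have := hyall z hz'
              simp; omega
          rw [hzero]
          simp
      · rw [if_neg hxy]
        obtain ⟨hp, hs, hc⟩ := ih (x :: xs) ys (by simp at hlen ⊢; omega) hxs hytail
        refine ⟨?_, ?_, ?_⟩
        · exact (hp.cons y).trans List.perm_middle.symm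
        · rw [List.pairwise_cons]
          refine ⟨?_, hs⟩
          intro b hb
          have hbmem := hp.mem_iff.mp hb
          rw [List.mem_append] at hbmem
          rcases hbmem with hbx | hby
          · rcases List.mem_cons.mp hbx with rfl | hbx'
            · omega
            · have := hxall b hbx'
              omega
          · exact hyall b hby
        · rw [hc, crossC_cons_right]
          have hfull : (x :: xs).countP (fun z => decide (y < z)) = xs.length + 1 := by
            have : (x :: xs).countP (fun z => decide (y < z)) = (x :: xs).length := by
              apply List.countP_eq_length.mpr
              intro z hz
              rcases List.mem_cons.mp hz with rfl | hz'
              · simp; omega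
              · have := hxall z hz'
                simp; omega
            rw [this, List.length_cons]
          rw [hfull]
          push_cast
          ring

theorem sortCount_spec : ∀ (xs : List Int),
    (pvSortCount xs).1.Perm xs ∧ (pvSortCount xs).1.Pairwise (· ≤ ·) ∧
    (pvSortCount xs).2 = (invC xs : Int) := by
  intro xs
  induction hn : xs.length using Nat.strong_induction_on generalizing xs with
  | _ n ih =>
    subst hn
    by_cases h : xs.length ≤ 1
    · rw [pvSortCount, dif_pos h]
      refine ⟨List.Perm.refl _, ?_, ?_⟩
      · match xs, h with
        | [], _ => exact List.Pairwise.nil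
        | [a], _ => simp
      · match xs, h with
        | [], _ => rfl
        | [a], _ => simp [invC]
    · rw [pvSortCount, dif_neg h]
      dsimp only
      have hlt : xs.length / 2 < xs.length := by omega
      have htlen : (xs.take (xs.length / 2)).length = xs.length / 2 := by
        rw [List.length_take]; omega
      have hdlen : (xs.drop (xs.length / 2)).length = xs.length - xs.length / 2 := by
        rw [List.length_drop]
      obtain ⟨hpl, hsl, hcl⟩ := ih (xs.take (xs.length / 2)).length
        (by omega) (xs.take (xs.length / 2)) rfl
      obtain ⟨hpr, hsr, hcr⟩ := ih (xs.drop (xs.length / 2)).length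
        (by omega) (xs.drop (xs.length / 2)) rfl
      obtain ⟨hpm, hsm, hcm⟩ := mergeCount_spec
        ((pvSortCount (xs.take (xs.length / 2))).1.length
          + (pvSortCount (xs.drop (xs.length / 2))).1.length)
        (pvSortCount (xs.take (xs.length / 2))).1
        (pvSortCount (xs.drop (xs.length / 2))).1
        le_rfl hsl hsr
      refine ⟨?_, hsm, ?_⟩
      · have hperm := hpm.trans (hpl.append hpr)
        rwa [List.take_append_drop] at hperm
      · rw [hcm, hcl, hcr]
        have hcross : crossC (pvSortCount (xs.take (xs.length / 2))).1
            (pvSortCount (xs.drop (xs.length / 2))).1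
            = crossC (xs.take (xs.length / 2)) (xs.drop (xs.length / 2)) :=
          crossC_perm hpl hpr
        rw [hcross]
        have := invC_append (xs.take (xs.length / 2)) (xs.drop (xs.length / 2))
        rw [List.take_append_drop] at this
        rw [this]
        push_cast
        ring

theorem B_fst (perm : List Int) :
    (inversion_count_and_involvement_alt perm).1 = (invC perm : Int) := by
  simp only [inversion_count_and_involvement_alt]
  exact (sortCount_spec perm).2.2

theorem getD_set_add (l : List Int) (i : Nat) (hi : i < l.length) (k : Nat) :
    (l.set i (l.getD i 0 + 1)).getD k 0 = l.getD k 0 + (if k = i then 1 else 0) := by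
  by_cases hk : k = i
  · subst hk
    rw [if_pos rfl, List.getD_eq_getElem?_getD, List.getElem?_set_self (by omega)]
    rfl
  · rw [if_neg hk, List.getD_eq_getElem?_getD, List.getElem?_set_ne (by omega),
      ← List.getD_eq_getElem?_getD]
    ring

-- the body of A's inner involvement loop
def innerF (perm : List Int) (aI : Int) (acc2 : List Int) (b : Int) : List Int :=
  if PySem.List.pyGetD perm b 0 < PySem.List.pyGetD perm aI 0 then
    PySem.List.pySetD (PySem.List.pySetD acc2 aI (PySem.List.pyGetD acc2 aI 0 + 1)) b
      (PySem.List.pyGetD (PySem.List.pySetD acc2 aI (PySem.List.pyGetD acc2 aI 0 + 1)) b 0 + 1)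
  else acc2

theorem drop_range_cons (n t : Nat) (h : t < n) :
    (List.range n).drop t = t :: (List.range n).drop (t + 1) := by
  rw [List.drop_eq_getElem_cons (by simpa using h)]
  simp

theorem innerLoop_spec (perm : List Int) (a : Nat) (ha : a < perm.length) :
    ∀ (d t : Nat), perm.length - t ≤ d → a < t →
    ∀ (cur : List Int), cur.length = perm.length →
    ((PySem.List.pyRange (t : Int) ((perm.length : Nat) : Int) 1).foldl
        (innerF perm ((a : Nat) : Int)) cur).length = perm.length ∧
    ∀ k, k < perm.length →
      ((PySem.List.pyRange (t : Int) ((perm.length : Nat) : Int) 1).foldl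
          (innerF perm ((a : Nat) : Int)) cur).getD k 0 = cur.getD k 0 +
        (if k = a then (((List.range perm.length).drop t).countP
            (fun j => decide (perm.getD j 0 < perm.getD a 0)) : Int)
         else if t ≤ k ∧ perm.getD k 0 < perm.getD a 0 then 1 else 0) := by
  intro d
  induction d with
  | zero =>
    intro t hd htgt cur hcur
    have htn : perm.length ≤ t := by omega
    rw [PySem.List.pyRange_one_eq_nil (by exact_mod_cast htn)]
    refine ⟨hcur, fun k hk => ?_⟩
    rw [List.drop_eq_nil_of_le (by simpa using htn)]
    simp only [List.foldl_nil, List.countP_nil, Nat.cast_zero]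
    split_ifs <;> omega
  | succ d ih =>
    intro t hd htgt cur hcur
    by_cases htn : t < perm.length
    · rw [PySem.List.pyRange_one_cons (by exact_mod_cast htn), List.foldl_cons]
      have hstep : ∀ (k : Nat), k < perm.length →
          (innerF perm ((a : Nat) : Int) cur ((t : Nat) : Int)).getD k 0
            = cur.getD k 0 + (if perm.getD t 0 < perm.getD a 0 then
                ((if k = a then 1 else 0) + (if k = t then 1 else 0)) else 0) := by
        intro k hk
        unfold innerF
        by_cases hcond : PySem.List.pyGetD perm ((t : Nat) : Int) 0
            < PySem.List.pyGetD perm ((a : Nat) : Int) 0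
        · rw [if_pos hcond,
            if_pos (by simpa [PySem.List.pyGetD_natCast] using hcond)]
          simp only [PySem.List.pySetD_natCast, PySem.List.pyGetD_natCast]
          have houter : ((cur.set a (cur.getD a 0 + 1)).set t
              ((cur.set a (cur.getD a 0 + 1)).getD t 0 + 1)).getD k 0
              = (cur.set a (cur.getD a 0 + 1)).getD k 0 + (if k = t then 1 else 0) :=
            getD_set_add _ _ (by simpa [hcur] using htn) _
          have hinner : ∀ k2 : Nat, (cur.set a (cur.getD a 0 + 1)).getD k2 0
              = cur.getD k2 0 + (if k2 = a then 1 else 0) :=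
            fun k2 => getD_set_add _ _ (by omega) _
          rw [houter, hinner k]
          ring
        · rw [if_neg hcond,
            if_neg (by simpa [PySem.List.pyGetD_natCast] using hcond)]
          ring
      have hlen1 : (innerF perm ((a : Nat) : Int) cur ((t : Nat) : Int)).length
          = perm.length := by
        unfold innerF
        by_cases hcond : PySem.List.pyGetD perm ((t : Nat) : Int) 0
            < PySem.List.pyGetD perm ((a : Nat) : Int) 0
        · rw [if_pos hcond]
          simp only [PySem.List.pySetD_natCast, PySem.List.pyGetD_natCast]
          simp [hcur]
        · rw [if_neg hcond]; exact hcur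
      have hcast : (t : Int) + 1 = (((t + 1 : Nat) : Nat) : Int) := by push_cast; ring
      rw [hcast]
      obtain ⟨ihlen, ihget⟩ := ih (t + 1) (by omega) (by omega) _ hlen1
      refine ⟨ihlen, fun k hk => ?_⟩
      rw [ihget k hk, hstep k hk]
      rw [drop_range_cons _ _ htn, List.countP_cons]
      simp only [decide_eq_true_iff]
      by_cases hkt : k = t
      · subst hkt
        split_ifs <;> push_cast <;> omega
      · split_ifs <;> push_cast <;> omega
    · rw [PySem.List.pyRange_one_eq_nil (by exact_mod_cast (by omega : perm.length ≤ t))]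
      refine ⟨hcur, fun k hk => ?_⟩
      rw [List.drop_eq_nil_of_le (by simpa using (by omega : perm.length ≤ t))]
      simp only [List.foldl_nil, List.countP_nil, Nat.cast_zero]
      split_ifs <;> omega

-- one step of A's outer involvement loop
def outerF (perm : List Int) (acc : List Int) (a : Int) : List Int :=
  (PySem.List.pyRange (a + 1) ((perm.length : Nat) : Int) 1).foldl (innerF perm a) acc

-- involvement after the outer loop has processed a ∈ [0, s)
def FF (perm : List Int) (s k : Nat) : Int :=
  (((List.range (min s k)).countP (fun a => decide (perm.getD k 0 < perm.getD a 0)) : Nat) : Int)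
  + (if k < s then ((((List.range perm.length).drop (k + 1)).countP
       (fun j => decide (perm.getD j 0 < perm.getD k 0)) : Nat) : Int) else 0)

theorem outerLoop_spec (perm : List Int) :
    ∀ (d s : Nat), perm.length - s ≤ d →
    ∀ (cur : List Int), cur.length = perm.length →
    (∀ k, k < perm.length → cur.getD k 0 = FF perm s k) →
    ((PySem.List.pyRange (s : Int) ((perm.length : Nat) : Int) 1).foldl
        (outerF perm) cur).length = perm.length ∧
    ∀ k, k < perm.length →
      ((PySem.List.pyRange (s : Int) ((perm.length : Nat) : Int) 1).foldl
          (outerF perm) cur).getD k 0 = FF perm perm.length k := by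
  intro d
  induction d with
  | zero =>
    intro s hd cur hcur hinv
    have hsn : perm.length ≤ s := by omega
    rw [PySem.List.pyRange_one_eq_nil (by exact_mod_cast hsn)]
    refine ⟨hcur, fun k hk => ?_⟩
    rw [List.foldl_nil, hinv k hk]
    unfold FF
    rw [min_eq_right (by omega : k ≤ s), min_eq_right (by omega : k ≤ perm.length),
      if_pos (by omega : k < s), if_pos hk]
  | succ d ih =>
    intro s hd cur hcur hinv
    by_cases hsn : s < perm.length
    · rw [PySem.List.pyRange_one_cons (by exact_mod_cast hsn), List.foldl_cons]
      have hcast : (s : Int) + 1 = (((s + 1 : Nat) : Nat) : Int) := by push_cast; ring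
      have hinner := innerLoop_spec perm s hsn perm.length (s + 1) (by omega) (by omega)
        cur hcur
      have hlen' : (outerF perm cur ((s : Nat) : Int)).length = perm.length := by
        unfold outerF
        rw [hcast]
        exact hinner.1
      have hget' : ∀ k, k < perm.length →
          (outerF perm cur ((s : Nat) : Int)).getD k 0 = FF perm (s + 1) k := by
        intro k hk
        unfold outerF
        rw [hcast, hinner.2 k hk, hinv k hk]
        unfold FF
        by_cases hks : k = s
        · subst hks
          rw [if_pos rfl, min_eq_right (by omega : k ≤ k + 1), min_self,
            if_neg (by omega : ¬ k < k), if_pos (by omega : k < k + 1)]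
          ring
        · rw [if_neg hks]
          by_cases hklt : k < s
          · rw [min_eq_right (by omega : k ≤ s), min_eq_right (by omega : k ≤ s + 1),
              if_pos hklt, if_pos (by omega : k < s + 1),
              if_neg (by rintro ⟨h1, _⟩; omega)]
            ring
          · have hkgt : s < k := by omega
            rw [min_eq_left (by omega : s ≤ k), min_eq_left (by omega : s + 1 ≤ k),
              if_neg (by omega : ¬ k < s), if_neg (by omega : ¬ k < s + 1),
              List.range_succ, List.countP_append, List.countP_cons, List.countP_nil]
            simp only [decide_eq_true_iff]
            by_cases hpp : perm.getD k 0 < perm.getD s 0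
            · rw [if_pos ⟨by omega, hpp⟩, if_pos hpp]
              push_cast; ring
            · rw [if_neg (by rintro ⟨_, h2⟩; exact hpp h2), if_neg hpp]
              push_cast; ring
      rw [hcast]
      exact ih (s + 1) (by omega) _ hlen' hget'
    · have hsn' : perm.length ≤ s := by omega
      rw [PySem.List.pyRange_one_eq_nil (by exact_mod_cast hsn')]
      refine ⟨hcur, fun k hk => ?_⟩
      rw [List.foldl_nil, hinv k hk]
      unfold FF
      rw [min_eq_right (by omega : k ≤ s), min_eq_right (by omega : k ≤ perm.length),
        if_pos (by omega : k < s), if_pos hk]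

theorem snd_eq (perm : List Int) :
    (inversion_count_and_involvement perm).2 = (inversion_count_and_involvement_alt perm).2 := by
  by_cases hn : ((perm.length : Nat) : Int) ≤ 1
  · have hlen : perm.length ≤ 1 := by exact_mod_cast hn
    match perm, hlen with
    | [], _ =>
      simp [inversion_count_and_involvement, inversion_count_and_involvement_alt]
    | [a], _ =>
      simp [inversion_count_and_involvement, inversion_count_and_involvement_alt,
        List.range_succ]
  · by_cases h2 : ((perm.length : Nat) : Int) ≤ 2000
    · simp only [inversion_count_and_involvement, inversion_count_and_involvement_alt]
      rw [if_neg hn, if_pos h2, if_pos h2]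
      have h0 : ((0 : Nat) : Int) = (0 : Int) := by norm_num
      obtain ⟨hL, hG⟩ := outerLoop_spec perm perm.length 0 (by omega)
        (List.replicate perm.length 0) (by simp)
        (by
          intro k hk
          rw [List.getD_eq_getElem?_getD, List.getElem?_replicate, if_pos hk]
          unfold FF
          rw [min_eq_left (by omega), if_neg (by omega)]
          simp)
      rw [h0] at hL hG
      have hmain : (PySem.List.pyRange 0 ((perm.length : Nat) : Int) 1).foldl
          (outerF perm) (List.replicate perm.length 0)
          = (List.range perm.length).map (fun k =>
            ((((List.range k).countP
                (fun j => decide (perm.getD k 0 < perm.getD j 0)) : Nat) : Int)) +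
            (((((List.range perm.length).drop (k + 1)).countP
                (fun j => decide (perm.getD j 0 < perm.getD k 0)) : Nat) : Int))) := by
        apply List.ext_getElem
        · rw [hL]; simp
        · intro k hk1 hk2
          have hk : k < perm.length := by rw [hL] at hk1; exact hk1
          have hA : (((PySem.List.pyRange 0 ((perm.length : Nat) : Int) 1).foldl
              (outerF perm) (List.replicate perm.length 0))[k]'hk1)
              = ((PySem.List.pyRange 0 ((perm.length : Nat) : Int) 1).foldl
              (outerF perm) (List.replicate perm.length 0)).getD k 0 := by
            rw [List.getD_eq_getElem?_getD, List.getElem?_eq_getElem hk1]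
            rfl
          rw [hA, hG k hk]
          rw [List.getElem_map, List.getElem_range]
          unfold FF
          rw [min_eq_right (by omega), if_pos hk]
      exact hmain
    · simp only [inversion_count_and_involvement, inversion_count_and_involvement_alt]
      rw [if_neg hn, if_neg h2, if_neg h2]

-- ===== VERDICT (by name: the statement is the Claim_ definition above) =====
theorem inversion_count_and_involvement_spec : Claim_equal_inversion_count_and_involvement := by
  intro perm _
  unfold Spec_inversion_count_and_involvement
  apply Prod.ext
  · rw [A_fst, B_fst]
  · exact snd_eq perm
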